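-- pv_equiv track=rewrite | github.com/CodeTemka/e2e-fraud-detection.v3 | src/fraud_detection/registry/prod_model.py | _resolve_metric_column
-- ===== SOURCE A (Python) =====
-- from typing import Iterable, Sequence
--
-- def _normalize_metric(metric: str) -> str:
--     return metric.strip().replace("-", "_")
--
-- def _resolve_metric_column(metric: str, columns: Iterable[str]) -> str:
--     metric_name = _normalize_metric(metric)
--     candidate = metric_name if metric_name.startswith("metrics.") else f"metrics.{metric_name}"
--     columns_list = list(columns)
--     if candidate in columns_list:
--         return candidate
--     for column in columns_list:
--         if column.lower() == candidate.lower():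
--             return column
--     suffix_matches = [col for col in columns_list if col.lower().endswith(f".{metric_name.lower()}")]
--     if len(suffix_matches) == 1:
--         return suffix_matches[0]
--     metric_columns = sorted(col for col in columns_list if col.startswith("metrics."))
--     raise ValueError(
--         "Metric not found in runs: "
--         f"{metric_name}. Available metrics: {', '.join(metric_columns) if metric_columns else 'none'}"
--     )
-- ===== SOURCE B (Python) =====
-- def _normalize_metric(metric: str) -> str:
--     return metric.strip().replace("-", "_")
--
-- def _resolve_metric_column(metric, columns):
--     metric_name = _normalize_metric(metric)
--     candidate = metric_name if metric_name.startswith("metrics.") else f"metrics.{metric_name}"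
--     cand_lower = candidate.lower()
--     suffix = f".{metric_name.lower()}"
--     exact_found = False
--     ci_first = None
--     suffix_matches = []
--     metric_columns = []
--     for col in columns:
--         if col == candidate:
--             exact_found = True
--         if ci_first is None and col.lower() == cand_lower:
--             ci_first = col
--         if col.lower().endswith(suffix):
--             suffix_matches.append(col)
--         if col.startswith("metrics."):
--             metric_columns.append(col)
--     if exact_found:
--         return candidate
--     if ci_first is not None:
--         return ci_first
--     if len(suffix_matches) == 1:
--         return suffix_matches[0]
--     metric_columns.sort()
--     raise ValueError(
--         "Metric not found in runs: "
--         f"{metric_name}. Available metrics: {', '.join(metric_columns) if metric_columns else 'none'}"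
--     )
-- ===== Notes on version B (the rewrite author's own statement) =====
-- stated objective: alternative
-- what changed: Replaced A's four separate scans of the column list (membership test, case-insensitive loop, suffix-filter comprehension, metrics-prefix comprehension) by one fold that accumulates all four facts in a single pass, followed by a priority decision.
import Mathlib
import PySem

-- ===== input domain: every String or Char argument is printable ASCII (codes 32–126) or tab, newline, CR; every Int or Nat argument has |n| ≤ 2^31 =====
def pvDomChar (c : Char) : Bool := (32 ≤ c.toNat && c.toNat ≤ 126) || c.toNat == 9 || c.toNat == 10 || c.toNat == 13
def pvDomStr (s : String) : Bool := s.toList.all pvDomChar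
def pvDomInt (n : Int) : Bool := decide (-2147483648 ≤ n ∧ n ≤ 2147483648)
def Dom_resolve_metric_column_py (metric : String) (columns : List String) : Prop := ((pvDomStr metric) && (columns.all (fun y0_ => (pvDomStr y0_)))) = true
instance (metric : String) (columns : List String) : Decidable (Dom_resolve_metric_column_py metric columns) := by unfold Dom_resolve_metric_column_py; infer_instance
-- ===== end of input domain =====

-- B replaces A's four separate scans of the column list by one accumulating pass plus a
-- priority decision (objective: alternative decomposition, same cost).
-- Both Pythons raise ValueError when no resolution exists; Pre_ excludes exactly those inputs.

-- ===== PORT A =====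
-- shared module helper _normalize_metric (both Python files define it identically)
def normalize_metric_py (metric : String) : String :=
  PySem.Str.replace (PySem.Str.strip metric) "-" "_"

def resolve_metric_column_py (metric : String) (columns : List String) : String :=
  let metric_name := normalize_metric_py metric
  let candidate := if PySem.Str.startswith metric_name "metrics." then metric_name
                   else PySem.Str.join "" ["metrics.", metric_name]
  if candidate ∈ columns then candidate
  else
    match columns.find? (fun column => PySem.Str.lower column == PySem.Str.lower candidate) with
    | some column => column
    | none =>
      let suffix_matches := columns.filter
        (fun col => PySem.Str.endswith (PySem.Str.lower col) (PySem.Str.join "" [".", PySem.Str.lower metric_name]))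
      if suffix_matches.length = 1 then (PySem.List.pyGet? suffix_matches 0).getD ""
      else ""  -- Python raises ValueError here; excluded by Pre_resolve_metric_column_py

-- ===== PORT B =====
def resolve_metric_column_py_alt (metric : String) (columns : List String) : String :=
  let metric_name := normalize_metric_py metric
  let candidate := if PySem.Str.startswith metric_name "metrics." then metric_name
                   else PySem.Str.join "" ["metrics.", metric_name]
  let cand_lower := PySem.Str.lower candidate
  let suffix := PySem.Str.join "" [".", PySem.Str.lower metric_name]
  -- single pass: (exact_found, ci_first, suffix_matches, metric_columns)
  let st := columns.foldl
    (fun (st : Bool × Option String × List String × List String) col =>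
      ( st.1 || (col == candidate),
        st.2.1.or (if PySem.Str.lower col == cand_lower then some col else none),
        st.2.2.1 ++ (if PySem.Str.endswith (PySem.Str.lower col) suffix then [col] else []),
        st.2.2.2 ++ (if PySem.Str.startswith col "metrics." then [col] else []) ))
    (false, none, [], [])
  if st.1 then candidate
  else
    match st.2.1 with
    | some c => c
    | none =>
      match st.2.2.1 with
      | [x] => x
      | _ => ""  -- Python raises ValueError here; excluded by Pre_resolve_metric_column_py

-- ===== PRECONDITION & SPEC =====
-- Pre_ excludes exactly the inputs on which Python A raises ValueError ("Metric not found"):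
-- no exact match, no case-insensitive match, and not exactly one suffix match.
def Pre_resolve_metric_column_py (metric : String) (columns : List String) : Prop :=
  let metric_name := normalize_metric_py metric
  let candidate := if PySem.Str.startswith metric_name "metrics." then metric_name
                   else PySem.Str.join "" ["metrics.", metric_name]
  candidate ∈ columns
  ∨ (∃ c ∈ columns, PySem.Str.lower c = PySem.Str.lower candidate)
  ∨ (columns.filter
      (fun col => PySem.Str.endswith (PySem.Str.lower col) (PySem.Str.join "" [".", PySem.Str.lower metric_name]))).length = 1
instance (metric : String) (columns : List String) : Decidable (Pre_resolve_metric_column_py metric columns) := by unfold Pre_resolve_metric_column_py; infer_instance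

def pvWitness_resolve_metric_column_py : String × List String := ("acc", ["metrics.acc", "other"])

def Spec_resolve_metric_column_py (metric : String) (columns : List String) (out : String) : Prop := out = resolve_metric_column_py_alt metric columns
instance (metric : String) (columns : List String) (out : String) : Decidable (Spec_resolve_metric_column_py metric columns out) := by unfold Spec_resolve_metric_column_py; infer_instance

-- ===== CLAIM (what is proved, stated in full; the proofs are below) =====
def Claim_equal_resolve_metric_column_py : Prop := ∀ (metric : String) (columns : List String), Dom_resolve_metric_column_py metric columns → Pre_resolve_metric_column_py metric columns → Spec_resolve_metric_column_py metric columns (resolve_metric_column_py metric columns)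

-- ===== LEMMAS AND PROOFS =====

-- B's single fold computes exactly: (A's membership test, A's first case-insensitive
-- match, A's suffix-match filter, the metrics-prefixed columns), each extended from the accumulator.
theorem foldB_eq (cand suff : String) (cols : List String) :
    ∀ (e : Bool) (o : Option String) (s m : List String),
    cols.foldl
      (fun (st : Bool × Option String × List String × List String) col =>
        ( st.1 || (col == cand),
          st.2.1.or (if PySem.Str.lower col == PySem.Str.lower cand then some col else none),
          st.2.2.1 ++ (if PySem.Str.endswith (PySem.Str.lower col) suff then [col] else []),
          st.2.2.2 ++ (if PySem.Str.startswith col "metrics." then [col] else []) ))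
      (e, o, s, m)
    = (e || cols.any (fun c => c == cand),
       o.or (cols.find? (fun c => PySem.Str.lower c == PySem.Str.lower cand)),
       s ++ cols.filter (fun c => PySem.Str.endswith (PySem.Str.lower c) suff),
       m ++ cols.filter (fun c => PySem.Str.startswith c "metrics.")) := by
  induction cols with
  | nil => intro e o s m; simp
  | cons h t ih =>
    intro e o s m
    simp only [List.foldl_cons]
    rw [ih]
    simp only [Prod.mk.injEq]
    refine ⟨?_, ?_, ?_, ?_⟩
    · simp [Bool.or_assoc]
    · by_cases h1 : (PySem.Str.lower h == PySem.Str.lower cand) = true <;>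
        cases o <;> simp [h1]
    · simp only [List.filter_cons, List.append_assoc]
      split_ifs <;> simp
    · simp only [List.filter_cons, List.append_assoc]
      split_ifs <;> simp

theorem any_beq_eq_mem (l : List String) (a : String) :
    l.any (fun c => c == a) = decide (a ∈ l) := by
  induction l with
  | nil => simp
  | cons h t ih =>
    have hb : (h == a) = decide (a = h) := by
      rcases eq_or_ne a h with rfl | hne
      · simp
      · simp [hne, Ne.symm hne]
    simp [List.any, ih, hb]

-- ===== VERDICT (by name: the statement is the Claim_ definition above) =====
theorem resolve_metric_column_py_spec : Claim_equal_resolve_metric_column_py := by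
  intro metric columns _ _
  unfold Spec_resolve_metric_column_py
  simp only [resolve_metric_column_py, resolve_metric_column_py_alt]
  rw [foldB_eq]
  simp only [Bool.false_or, Option.none_or, List.nil_append]
  rw [any_beq_eq_mem]
  set cand := (if PySem.Str.startswith (normalize_metric_py metric) "metrics." then normalize_metric_py metric else PySem.Str.join "" ["metrics.", normalize_metric_py metric]) with hc
  set suff := PySem.Str.join "" [".", PySem.Str.lower (normalize_metric_py metric)] with hs
  by_cases hmem : cand ∈ columns
  · simp [hmem]
  · simp only [hmem, decide_false, if_false, Bool.false_eq_true]
    cases hfind : columns.find? (fun c => PySem.Str.lower c == PySem.Str.lower cand) with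
    | some c => simp
    | none =>
      cases hfil : columns.filter (fun c => PySem.Str.endswith (PySem.Str.lower c) suff) with
      | nil => simp
      | cons x t =>
        cases t with
        | nil => simp
        | cons y t' => simp
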